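-- pv_equiv track=rewrite | github.com/Ryeong-j/Programmers_Codingtest | 프로그래머스/0/120884. 치킨 쿠폰/치킨 쿠폰.py | solution
-- ===== SOURCE A (Python) =====
-- def solution(chicken):
-- #     answer = 0
-- #     a = []
--
-- #     while chicken:
-- #         a.append(chicken % 10)
-- #         chicken = chicken // 10
-- #         answer+=chicken
--
-- #     if sum(a)>=10:
-- #         answer+=sum(a)//10
-- #         if sum(a)%10+sum(a)//10 >= 10:
-- #             answer+=(sum(a)%10+sum(a)//10)//10
--
-- #     return answer
--
-- # 10951
-- # 1095    1
-- #  109     5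
-- #   10      9
-- #    1      1
-- #   1215
--
--     answer = 0
--     a = 0
--
--     while chicken:
--         a+=chicken % 10
--         chicken = chicken // 10
--         answer+=chicken
--
--     if a>=10:
--         answer+= a//10
--         if a%10+a//10 >= 10:
--             answer+=(a%10+a//10)//10
--
--     return answer
-- ===== SOURCE B (Python) =====
-- def solution(chicken):
--     answer = 0
--     coupon = chicken
--     while coupon >= 10:
--         bonus = coupon // 10
--         answer += bonus
--         coupon = coupon % 10 + bonus
--     return answer
-- ===== Notes on version B (the rewrite author's own statement) =====
-- stated objective: simpler
-- what changed: Replaces A's digit-sum accumulation with a two-level carry correction by the classic coupon-exchange simulation that maintains the live coupon total (answer += coupon//10; coupon = coupon%10 + coupon//10).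
-- outside the precondition, e.g. on solution(-3): A does not finish within the time limit, B returns 0
import Mathlib
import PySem

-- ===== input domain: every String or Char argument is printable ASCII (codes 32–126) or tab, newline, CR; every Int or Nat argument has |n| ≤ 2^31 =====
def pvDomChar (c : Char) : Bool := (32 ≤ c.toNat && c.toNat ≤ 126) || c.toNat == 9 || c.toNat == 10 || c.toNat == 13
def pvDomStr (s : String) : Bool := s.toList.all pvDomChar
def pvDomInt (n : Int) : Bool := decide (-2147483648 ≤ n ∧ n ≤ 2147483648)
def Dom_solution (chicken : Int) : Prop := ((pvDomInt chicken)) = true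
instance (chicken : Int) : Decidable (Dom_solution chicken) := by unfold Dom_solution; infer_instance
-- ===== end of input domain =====

-- B replaces A's digit-sum + two-level carry correction with the classic
-- coupon-exchange simulation (objective: simpler).  A's while loop diverges for
-- negative chicken (Python // floors toward -inf), hence Pre_ = 0 ≤ chicken.

-- ===== PORT A =====
-- A's while loop: a += chicken % 10; chicken //= 10; answer += chicken.
-- Python's loop runs while chicken ≠ 0 and diverges for negative chicken；
-- the recursion is guarded by 0 < chicken, which agrees with Python on all of Pre_.
def solutionLoopA (chicken a answer : Int) : Int × Int :=
  if h : 0 < chicken then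
    solutionLoopA (PySem.Int.floordiv chicken 10)
      (a + PySem.Int.mod chicken 10)
      (answer + PySem.Int.floordiv chicken 10)
  else (a, answer)
termination_by chicken.toNat
decreasing_by
  have h1 : PySem.Int.floordiv chicken 10 = chicken / 10 :=
    PySem.Int.floordiv_eq_ediv_of_pos (by omega)
  rw [h1]; omega

def solution (chicken : Int) : Int :=
  let (a, answer) := solutionLoopA chicken 0 0
  let answer :=
    if a ≥ 10 then
      let answer := answer + PySem.Int.floordiv a 10
      if PySem.Int.mod a 10 + PySem.Int.floordiv a 10 ≥ 10 then
        answer + PySem.Int.floordiv (PySem.Int.mod a 10 + PySem.Int.floordiv a 10) 10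
      else answer
    else answer
  answer

-- ===== PORT B =====
-- while coupon >= 10: bonus = coupon // 10; answer += bonus; coupon = coupon % 10 + bonus
def solutionLoopB (coupon answer : Int) : Int :=
  if h : coupon ≥ 10 then
    solutionLoopB (PySem.Int.mod coupon 10 + PySem.Int.floordiv coupon 10)
      (answer + PySem.Int.floordiv coupon 10)
  else answer
termination_by coupon.toNat
decreasing_by
  have h1 : PySem.Int.floordiv coupon 10 = coupon / 10 :=
    PySem.Int.floordiv_eq_ediv_of_pos (by omega)
  have h2 : PySem.Int.mod coupon 10 = coupon % 10 :=
    PySem.Int.mod_eq_emod_of_pos (by omega)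
  rw [h1, h2]; omega

def solution_alt (chicken : Int) : Int :=
  solutionLoopB chicken 0

-- ===== PRECONDITION & SPEC =====
-- Pre_ excludes negative chicken, on which Python's A never terminates (chicken // 10 floors to -1 forever).
def Pre_solution (chicken : Int) : Prop := 0 ≤ chicken
instance (chicken : Int) : Decidable (Pre_solution chicken) := by unfold Pre_solution; infer_instance
def pvWitness_solution : Int := (10951)

def Spec_solution (chicken : Int) (out : Int) : Prop := out = solution_alt chicken
instance (chicken : Int) (out : Int) : Decidable (Spec_solution chicken out) := by unfold Spec_solution; infer_instance

-- ===== CLAIM (what is proved, stated in full; the proofs are below) =====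
def Claim_equal_solution : Prop := ∀ (chicken : Int), Dom_solution chicken → Pre_solution chicken → Spec_solution chicken (solution chicken)

-- ===== LEMMAS AND PROOFS =====

-- Digit sum and A's loop-accumulated answer, as closed recursions.
def dsum (c : Int) : Int :=
  if h : 0 < c then dsum (c / 10) + c % 10 else 0
termination_by c.toNat
decreasing_by omega

def qsum (c : Int) : Int :=
  if h : 0 < c then c / 10 + qsum (c / 10) else 0
termination_by c.toNat
decreasing_by omega

theorem dsum_eq (c : Int) :
    dsum c = if 0 < c then dsum (c / 10) + c % 10 else 0 := by
  rw [dsum]; split <;> simp_all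

theorem qsum_eq (c : Int) :
    qsum c = if 0 < c then c / 10 + qsum (c / 10) else 0 := by
  rw [qsum]; split <;> simp_all

theorem loopA_spec (c a ans : Int) :
    solutionLoopA c a ans = (a + dsum c, ans + qsum c) := by
  induction c, a, ans using solutionLoopA.induct with
  | case1 c a ans h ih =>
      have h1 : PySem.Int.floordiv c 10 = c / 10 :=
        PySem.Int.floordiv_eq_ediv_of_pos (by omega)
      have h2 : PySem.Int.mod c 10 = c % 10 :=
        PySem.Int.mod_eq_emod_of_pos (by omega)
      rw [solutionLoopA, dif_pos h, ih, h1, h2, dsum_eq c, qsum_eq c,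
        if_pos h, if_pos h]
      rw [Prod.mk.injEq]
      constructor <;> ring
  | case2 c a ans h =>
      rw [solutionLoopA, dif_neg h, dsum_eq, qsum_eq, if_neg h, if_neg h]
      simp

theorem dsum_nonneg (c : Int) : 0 ≤ dsum c := by
  induction c using dsum.induct with
  | case1 c h ih => rw [dsum_eq, if_pos h]; omega
  | case2 c h => rw [dsum_eq, if_neg h]

theorem dsum_pos (c : Int) (h : 0 < c) : 1 ≤ dsum c := by
  induction c using dsum.induct with
  | case1 c h ih =>
      rw [dsum_eq, if_pos h]
      by_cases hq : 0 < c / 10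
      · have := ih hq; omega
      · have : dsum (c / 10) = 0 := by rw [dsum_eq, if_neg hq]
        omega
  | case2 c hneg => omega

theorem nine_qsum : ∀ c : Int, 0 ≤ c → 9 * qsum c = c - dsum c := by
  intro c
  induction c using qsum.induct with
  | case1 c hpos ih =>
      intro _
      rw [qsum_eq, if_pos hpos, dsum_eq, if_pos hpos]
      have ih' := ih (by omega)
      omega
  | case2 c hneg =>
      intro hc
      rw [qsum_eq, if_neg hneg, dsum_eq, if_neg hneg]
      omega

theorem dsum_le (k : Nat) : ∀ c : Int, c < 10 ^ k → dsum c ≤ 9 * k := by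
  induction k with
  | zero =>
      intro c hc
      rw [dsum_eq, if_neg (by simp at hc; omega)]; simp
  | succ k ih =>
      intro c hc
      by_cases h : 0 < c
      · rw [dsum_eq, if_pos h]
        have hdiv : c / 10 < 10 ^ k := by
          rw [pow_succ] at hc; omega
        have := ih (c / 10) hdiv
        push_cast
        omega
      · rw [dsum_eq, if_neg h]; positivity

-- B's loop computes (c-1)/9 for c ≥ 1 (and 0 below 10), by strong induction.
theorem loopB_spec (c ans : Int) :
    solutionLoopB c ans = ans + (if 1 ≤ c then (c - 1) / 9 else 0) := by
  induction c, ans using solutionLoopB.induct with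
  | case1 c ans h ih =>
      rw [solutionLoopB, dif_pos h]
      have h1 : PySem.Int.floordiv c 10 = c / 10 :=
        PySem.Int.floordiv_eq_ediv_of_pos (by omega)
      have h2 : PySem.Int.mod c 10 = c % 10 :=
        PySem.Int.mod_eq_emod_of_pos (by omega)
      rw [h1, h2] at ih ⊢
      rw [ih]
      have h10 : c ≥ 10 := h
      split_ifs <;> omega
  | case2 c ans h =>
      rw [solutionLoopB, dif_neg h]
      split_ifs <;> omega

-- ===== VERDICT (by name: the statement is the Claim_ definition above) =====
theorem solution_spec : Claim_equal_solution := by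
  intro chicken hdom hpre
  have hpre' : 0 ≤ chicken := hpre
  unfold Spec_solution solution solution_alt
  rw [loopA_spec, loopB_spec]
  simp only [zero_add]
  have hS9 := nine_qsum chicken hpre'
  have hub : chicken < 10 ^ 10 := by
    unfold Dom_solution pvDomInt at hdom
    simp at hdom
    norm_num
    omega
  have hSle : dsum chicken ≤ 90 := by
    have := dsum_le 10 chicken hub
    omega
  have hS0 : 0 ≤ dsum chicken := dsum_nonneg chicken
  by_cases hc : 1 ≤ chicken
  · have hS1 : 1 ≤ dsum chicken := dsum_pos chicken (by omega)
    rw [if_pos hc]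
    set S := dsum chicken with hSdef
    set Q := qsum chicken with hQdef
    have hf : PySem.Int.floordiv S 10 = S / 10 :=
      PySem.Int.floordiv_eq_ediv_of_pos (by omega)
    have hm : PySem.Int.mod S 10 = S % 10 :=
      PySem.Int.mod_eq_emod_of_pos (by omega)
    have hf2 : PySem.Int.floordiv (PySem.Int.mod S 10 + PySem.Int.floordiv S 10) 10
        = (S % 10 + S / 10) / 10 := by
      rw [hf, hm]; exact PySem.Int.floordiv_eq_ediv_of_pos (by omega)
    rw [hf2, hf, hm]
    split_ifs <;> omega
  · have h0 : chicken = 0 := by omega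
    subst h0
    have hd : dsum 0 = 0 := by rw [dsum_eq]; simp
    have hq : qsum 0 = 0 := by rw [qsum_eq]; simp
    simp [hd, hq]
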